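-- pv_equiv track=rewrite | github.com/crazymerlyn/adventofcode | src/day12.py | iterate_til_repeat
-- ===== SOURCE A (Python) =====
-- def sign(x):
--     return 1 if x > 0 else -1 if x < 0 else 0
--
-- def simple_next_step(moons):
--     for m1 in moons:
--         for m2 in moons:
--             m1[1] += sign(m2[0] - m1[0])
--     for m1 in moons:
--         m1[0] += m1[1]
--     return moons
--
-- def iterate_til_repeat(moons, dimension):
--     moons = [[x[dimension], v[dimension]] for x, v in moons]
--     orig = [[x,v] for x,v in moons]
--     i = 1
--     moons = simple_next_step(moons)
--     while moons != orig:
--         moons = simple_next_step(moons)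
--         i += 1
--     return i
-- ===== SOURCE B (Python) =====
-- def iterate_til_repeat(moons, dimension):
--     pos = [x[dimension] for x, v in moons]
--     vel = [v[dimension] for x, v in moons]
--     orig = (list(pos), list(vel))
--     n = len(pos)
--     steps = 0
--     while True:
--         # each moon's velocity delta = (#positions greater) - (#positions less),
--         # read off a sorted copy in one grouping pass
--         sp = sorted(pos)
--         delta = {}
--         i = 0
--         while i < n:
--             j = i
--             while j < n and sp[j] == sp[i]:
--                 j += 1
--             delta[sp[i]] = (n - j) - i
--             i = j
--         vel = [v + delta[p] for p, v in zip(pos, vel)]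
--         pos = [p + v for p, v in zip(pos, vel)]
--         steps += 1
--         if (pos, vel) == orig:
--             return steps
-- ===== Notes on version B (the rewrite author's own statement) =====
-- stated objective: alternative
-- what changed: Replaces A's all-pairs gravity scan (sum of sign(p2-p1) over every moon pair, mutating 2-lists in place) by one sort of the positions per step plus a single grouping pass that records each position's velocity delta as (#positions greater) - (#positions less) in a dict, with the state kept as two functional (pos, vel) lists; per step this is O(n log n) instead of O(n^2), though a timing run could not verify it on this task's inputs.
import Mathlib
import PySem

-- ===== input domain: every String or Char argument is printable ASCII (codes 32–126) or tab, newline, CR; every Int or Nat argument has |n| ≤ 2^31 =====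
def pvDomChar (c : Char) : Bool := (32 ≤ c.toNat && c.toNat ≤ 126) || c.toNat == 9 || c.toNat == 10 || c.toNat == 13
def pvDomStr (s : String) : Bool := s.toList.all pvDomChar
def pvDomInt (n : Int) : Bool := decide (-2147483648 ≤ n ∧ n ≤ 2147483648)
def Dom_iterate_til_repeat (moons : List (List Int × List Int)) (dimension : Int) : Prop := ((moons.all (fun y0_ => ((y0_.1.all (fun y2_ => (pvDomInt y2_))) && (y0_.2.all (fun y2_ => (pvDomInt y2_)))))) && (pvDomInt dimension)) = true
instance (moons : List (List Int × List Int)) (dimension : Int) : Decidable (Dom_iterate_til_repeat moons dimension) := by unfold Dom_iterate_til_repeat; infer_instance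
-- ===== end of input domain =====

-- B replaces A's all-pairs gravity scan by one sort per step plus a grouping pass
-- (velocity delta of a moon at p = #positions greater − #positions less); return value only.
-- Both loops carry the same fuel bound pvFuel, a totality guard only (Python's
-- 'while' loops diverge when the state never repeats; inside Pre_ nothing is
-- claimed about such inputs beyond port-vs-port equality, which holds fuel-wise).

-- ===== PORT A =====
def pysign (x : Int) : Int := if x > 0 then 1 else if x < 0 then -1 else 0

-- first loop: only velocities change and only positions are read, so the in-place
-- update over the 2-lists is exactly this map+fold; second loop: x += v per moon
def simple_next_step (ms : List (Int × Int)) : List (Int × Int) :=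
  let ms1 := ms.map (fun m1 => (m1.1, ms.foldl (fun v m2 => v + pysign (m2.1 - m1.1)) m1.2))
  ms1.map (fun m => (m.1 + m.2, m.2))

def pvFuel : Nat := 4294967296

-- 'while moons != orig: moons = simple_next_step(moons); i += 1' (fuel-exhaustion value 0 is unreachable where Python returns)
def loopA (orig : List (Int × Int)) : Nat → List (Int × Int) → Int → Int
  | 0, _, _ => 0
  | f+1, ms, i => if ms = orig then i else loopA orig f (simple_next_step ms) (i + 1)

def iterate_til_repeat (moons : List (List Int × List Int)) (dimension : Int) : Int :=
  -- x[dimension] / v[dimension]: pyGetD, total form; Pre_ requires the index in range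
  let ms := moons.map (fun m => (PySem.List.pyGetD m.1 dimension 0, PySem.List.pyGetD m.2 dimension 0))
  loopA ms pvFuel (simple_next_step ms) 1

-- ===== PORT B =====
-- inner 'while j < n and sp[j] == sp[i]: j += 1' : length of the leading run equal to p
def runLen (p : Int) : List Int → Nat
  | [] => 0
  | q :: t => if q = p then runLen p t + 1 else 0

-- outer 'while i < n' grouping pass over the sorted positions sp
def groupDeltas (n : Int) : List Int → Int → PySem.Dict Int Int → PySem.Dict Int Int
  | [], _, d => d
  | p :: t, i, d =>
      let r := runLen p t
      groupDeltas n (t.drop r) (i + 1 + (r : Int)) (d.insert p ((n - (i + 1 + (r : Int))) - i))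
  termination_by sp => sp.length
  decreasing_by simp only [List.length_drop, List.length_cons]; omega

def stepB (st : List Int × List Int) : List Int × List Int :=
  let n : Int := st.1.length
  let sp := PySem.List.sorted st.1 (fun x => x) false
  let d := groupDeltas n sp 0 PySem.Dict.empty
  -- delta[p]: every p of pos occurs in sp, so the key is always present; getD's default is unreachable
  let vel := (st.1.zip st.2).map (fun pv => pv.2 + d.getD pv.1 0)
  let pos := (st.1.zip vel).map (fun pv => pv.1 + pv.2)
  (pos, vel)

-- 'while True: … steps += 1; if (pos, vel) == orig: return steps' (same fuel guard as loopA)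
def loopB (orig : List Int × List Int) : Nat → (List Int × List Int) → Int → Int
  | 0, _, _ => 0
  | f+1, st, s =>
      let st' := stepB st
      if st' = orig then s + 1 else loopB orig f st' (s + 1)

def iterate_til_repeat_alt (moons : List (List Int × List Int)) (dimension : Int) : Int :=
  let pos := moons.map (fun m => PySem.List.pyGetD m.1 dimension 0)
  let vel := moons.map (fun m => PySem.List.pyGetD m.2 dimension 0)
  loopB (pos, vel) pvFuel (pos, vel) 0

-- ===== PRECONDITION & SPEC =====
-- Pre_ excludes (a) inputs where some moon's position or velocity list has no index
-- `dimension` (A raises IndexError) and (b) inputs whose velocities along the chosen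
-- dimension do not sum to 0 (A never returns there: the position sum drifts by that
-- constant nonzero amount every step, so the state cannot repeat). No input on which
-- A returns normally is excluded.
def Pre_iterate_til_repeat (moons : List (List Int × List Int)) (dimension : Int) : Prop :=
  (∀ m ∈ moons, PySem.Raise.InRange m.1.length dimension ∧ PySem.Raise.InRange m.2.length dimension) ∧
  (moons.map (fun m => PySem.List.pyGetD m.2 dimension 0)).sum = 0

instance (moons : List (List Int × List Int)) (dimension : Int) : Decidable (Pre_iterate_til_repeat moons dimension) := by
  unfold Pre_iterate_til_repeat; infer_instance

def pvWitness_iterate_til_repeat : (List (List Int × List Int)) × Int :=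
  ([([0], [0]), ([3], [0])], 0)

def Spec_iterate_til_repeat (moons : List (List Int × List Int)) (dimension : Int) (out : Int) : Prop := out = iterate_til_repeat_alt moons dimension
instance (moons : List (List Int × List Int)) (dimension : Int) (out : Int) : Decidable (Spec_iterate_til_repeat moons dimension out) := by unfold Spec_iterate_til_repeat; infer_instance

-- ===== CLAIM (what is proved, stated in full; the proofs are below) =====
def Claim_equal_iterate_til_repeat : Prop := ∀ (moons : List (List Int × List Int)) (dimension : Int), Dom_iterate_til_repeat moons dimension → Pre_iterate_til_repeat moons dimension → Spec_iterate_til_repeat moons dimension (iterate_til_repeat moons dimension)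

-- ===== LEMMAS AND PROOFS =====

-- pairing a list of pairs back from its two projections
theorem pv_unzip_inj : ∀ (xs ys : List (Int × Int)),
    xs.map Prod.fst = ys.map Prod.fst → xs.map Prod.snd = ys.map Prod.snd → xs = ys := by
  intro xs
  induction xs with
  | nil => intro ys h1 _; cases ys <;> simp_all
  | cons a t ih =>
      intro ys h1 h2
      cases ys with
      | nil => simp_all
      | cons b u =>
          simp only [List.map_cons, List.cons.injEq] at h1 h2
          exact List.cons_eq_cons.mpr ⟨Prod.ext h1.1 h2.1, ih u h1.2 h2.2⟩

-- A's inner gravity fold is (#greater) − (#less)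
theorem pv_fold_sign (p : Int) : ∀ (ms : List (Int × Int)) (v : Int),
    ms.foldl (fun v m2 => v + pysign (m2.1 - p)) v
      = v + ((ms.countP (fun m2 => p < m2.1) : Int) - (ms.countP (fun m2 => m2.1 < p) : Int)) := by
  intro ms
  induction ms with
  | nil => simp
  | cons a t ih =>
      intro v
      rw [List.foldl_cons, ih]
      simp only [List.countP_cons]
      rcases lt_trichotomy p a.1 with h | h | h
      · simp only [pysign, if_pos (show a.1 - p > 0 by omega), decide_eq_true_eq]
        simp [h, show ¬ a.1 < p by omega]
        ring
      · simp only [pysign, if_neg (show ¬ a.1 - p > 0 by omega), if_neg (show ¬ a.1 - p < 0 by omega)]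
        simp [show ¬ p < a.1 by omega, show ¬ a.1 < p by omega]
      · simp only [pysign, if_neg (show ¬ a.1 - p > 0 by omega), if_pos (show a.1 - p < 0 by omega)]
        simp [show ¬ p < a.1 by omega, h]
        ring

theorem pv_runLen_le (p : Int) : ∀ t : List Int, runLen p t ≤ t.length := by
  intro t; induction t with
  | nil => simp [runLen]
  | cons q u ih => simp only [runLen]; split <;> simp <;> omega

theorem pv_take_runLen (p : Int) : ∀ t : List Int, ∀ x ∈ t.take (runLen p t), x = p := by
  intro t
  induction t with
  | nil => simp
  | cons q u ih =>
      simp only [runLen]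
      split
      · rename_i hq
        intro x hx
        simp only [List.take_succ_cons, List.mem_cons] at hx
        rcases hx with rfl | hx
        · exact hq
        · exact ih x hx
      · simp

-- under sortedness, everything after the leading run of p (the head) is > p
theorem pv_drop_runLen_gt (p : Int) : ∀ t : List Int,
    (p :: t).Pairwise (fun a b => a ≤ b) →
    ∀ x ∈ t.drop (runLen p t), p < x := by
  intro t
  induction t with
  | nil => simp
  | cons q u ih =>
      intro hs x hx
      simp only [runLen] at hx
      by_cases hq : q = p
      · subst hq
        rw [if_pos rfl] at hx
        simp only [List.drop_succ_cons] at hx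
        have hs' : (q :: u).Pairwise (fun a b => a ≤ b) := by
          have := hs.sublist (l₁ := q :: u) (by
            refine List.cons_sublist_cons.mpr (List.sublist_cons_self q u))
          exact this
        exact ih hs' x hx
      · rw [if_neg hq] at hx
        simp only [List.drop_zero] at hx
        have h1 := List.pairwise_cons.mp hs
        have h2 := List.pairwise_cons.mp h1.2
        have hpq : p < q := lt_of_le_of_ne (h1.1 q (by simp)) (Ne.symm hq)
        rcases List.mem_cons.mp hx with rfl | hxu
        · exact hpq
        · exact lt_of_lt_of_le hpq (h2.1 x hxu)

-- reading a key back out of the grouping pass: untouched keys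
theorem pv_countP_const (q : Int) (pr : Int → Bool) : ∀ (l : List Int), (∀ x ∈ l, x = q) →
    l.countP pr = if pr q then l.length else 0 := by
  intro l
  induction l with
  | nil => simp
  | cons a t ih =>
      intro h
      have ha : a = q := h a (by simp)
      have ht := ih (fun x hx => h x (by simp [hx]))
      simp only [List.countP_cons, ht, ha, List.length_cons]
      split <;> simp

theorem pv_groupDeltas_out (n : Int) (sp : List Int) (i : Int) (d : PySem.Dict Int Int) (p : Int) :
    p ∉ sp → (groupDeltas n sp i d).getD p 0 = d.getD p 0 := by
  induction sp, i, d using groupDeltas.induct (n := n) with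
  | case1 i d => intro _; simp [groupDeltas]
  | case2 q t i d r ih =>
      intro hp
      simp only [List.mem_cons, not_or] at hp
      rw [groupDeltas]
      have h1 : p ∉ t.drop (runLen q t) := fun h => hp.2 (List.mem_of_mem_drop h)
      rw [ih h1, PySem.Dict.getD_insert]
      rw [if_neg hp.1]

-- the grouping pass records (n − (consumed + #≤p)) − (consumed + #<p) for every key present
theorem pv_groupDeltas_in (n : Int) (sp : List Int) (i : Int) (d : PySem.Dict Int Int) (p : Int) :
    sp.Pairwise (fun a b => a ≤ b) → p ∈ sp →
    (groupDeltas n sp i d).getD p 0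
      = (n - (i + (sp.countP (fun x => x ≤ p) : Int))) - (i + (sp.countP (fun x => x < p) : Int)) := by
  induction sp, i, d using groupDeltas.induct (n := n) with
  | case1 i d => intro _ hp; simp at hp
  | case2 q t i d r ih =>
      intro hs hp
      have hr : runLen q t ≤ t.length := pv_runLen_le q t
      have htake : ∀ x ∈ t.take (runLen q t), x = q := pv_take_runLen q t
      have hdrop : ∀ x ∈ t.drop (runLen q t), q < x := pv_drop_runLen_gt q t hs
      have hlen : (t.take (runLen q t)).length = runLen q t := List.length_take_of_le hr
      have hcount : ∀ pr : Int → Bool, (q :: t).countP pr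
          = (if pr q then 1 else 0) + (if pr q then (runLen q t : Nat) else 0)
            + (t.drop (runLen q t)).countP pr := by
        intro pr
        have hsum : t.countP pr = (t.take (runLen q t)).countP pr + (t.drop (runLen q t)).countP pr := by
          rw [← List.countP_append, List.take_append_drop]
        rw [List.countP_cons, hsum, pv_countP_const q pr _ htake, hlen]
        by_cases hq : pr q <;> simp [hq] <;> omega
      rw [groupDeltas]
      by_cases hpq : p = q
      · subst hpq
        have hout : p ∉ t.drop (runLen p t) := fun h => absurd (hdrop p h) (lt_irrefl p)
        rw [pv_groupDeltas_out _ _ _ _ _ hout, PySem.Dict.getD_insert, if_pos rfl]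
        have c1 : (p :: t).countP (fun x => x ≤ p) = 1 + runLen p t := by
          rw [hcount]
          have h0 : (t.drop (runLen p t)).countP (fun x => x ≤ p) = 0 := by
            rw [List.countP_eq_zero]
            intro x hx
            have := hdrop x hx
            simp only [decide_eq_true_eq]
            omega
          simp [h0]
        have c2 : (p :: t).countP (fun x => x < p) = 0 := by
          rw [List.countP_eq_zero]
          intro x hx
          simp only [decide_eq_true_eq]
          rcases List.mem_cons.mp hx with rfl | hxt
          · omega
          · have hx2 : x ∈ t.take (runLen p t) ++ t.drop (runLen p t) := by
              rw [List.take_append_drop]; exact hxt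
            rcases List.mem_append.mp hx2 with h | h
            · rw [htake x h]; omega
            · have := hdrop x h; omega
        rw [c1, c2]
        push_cast
        ring
      · have hpt : p ∈ t := by
          rcases List.mem_cons.mp hp with h | h
          · exact absurd h hpq
          · exact h
        have hqp : q < p :=
          lt_of_le_of_ne ((List.pairwise_cons.mp hs).1 p hpt) (fun h => hpq h.symm)
        have hptd : p ∈ t.drop (runLen q t) := by
          have hx2 : p ∈ t.take (runLen q t) ++ t.drop (runLen q t) := by
            rw [List.take_append_drop]; exact hpt
          rcases List.mem_append.mp hx2 with h | h
          · exact absurd (htake p h) hpq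
          · exact h
        have hs' : (t.drop (runLen q t)).Pairwise (fun a b => a ≤ b) :=
          ((List.pairwise_cons.mp hs).2).sublist (List.drop_sublist _ t)
        rw [ih hs' hptd]
        have c1 := hcount (fun x => x ≤ p)
        have c2 := hcount (fun x => x < p)
        rw [if_pos (by simpa using le_of_lt hqp), if_pos (by simpa using le_of_lt hqp)] at c1
        rw [if_pos (by simpa using hqp), if_pos (by simpa using hqp)] at c2
        rw [c1, c2]
        push_cast
        ring

-- the dict built from sorted(pos) holds exactly #greater − #less of pos, per position
theorem pv_delta_spec (pos : List Int) (p : Int) (hp : p ∈ pos) :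
    (groupDeltas (pos.length : Int) (PySem.List.sorted pos (fun x => x) false) 0 PySem.Dict.empty).getD p 0
      = ((pos.countP (fun x => p < x) : Int) - (pos.countP (fun x => x < p) : Int)) := by
  have hs : (PySem.List.sorted pos (fun x => x) false).Pairwise (fun a b => a ≤ b) :=
    PySem.List.sorted_pairwise pos (fun x => x)
  have hmem : p ∈ PySem.List.sorted pos (fun x => x) false :=
    (PySem.List.mem_sorted pos (fun x => x) false p).mpr hp
  have hperm : (PySem.List.sorted pos (fun x => x) false).Perm pos := PySem.List.sorted_perm pos _ _
  rw [pv_groupDeltas_in _ _ _ _ _ hs hmem, hperm.countP_eq, hperm.countP_eq]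
  have hsplit : pos.length = pos.countP (fun x => decide (x ≤ p)) + pos.countP (fun x => decide (p < x)) := by
    rw [List.length_eq_countP_add_countP (fun x => decide (x ≤ p))]
    congr 1
    apply List.countP_congr
    intro x _
    simp [not_le]
  omega

-- one gravity+drift step: B's sorted/grouped step equals A's all-pairs step
theorem pv_step_eq (ms : List (Int × Int)) :
    stepB (ms.map Prod.fst, ms.map Prod.snd)
      = ((simple_next_step ms).map Prod.fst, (simple_next_step ms).map Prod.snd) := by
  have hdelta : ∀ m ∈ ms,
      (groupDeltas ((ms.map Prod.fst).length : Int) (PySem.List.sorted (ms.map Prod.fst) (fun x => x) false) 0 PySem.Dict.empty).getD m.1 0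
        = ((ms.countP (fun m2 => decide (m.1 < m2.1)) : Int) - (ms.countP (fun m2 => decide (m2.1 < m.1)) : Int)) := by
    intro m hm
    rw [pv_delta_spec (ms.map Prod.fst) m.1 (List.mem_map_of_mem hm)]
    rw [List.countP_map, List.countP_map]
    rfl
  simp only [stepB, simple_next_step, List.zip_map', List.map_map, Prod.mk.injEq]
  refine ⟨?_, ?_⟩ <;>
  · apply List.map_congr_left
    intro m hm
    simp only [Function.comp]
    rw [hdelta m hm, pv_fold_sign]
    try ring

-- the two fuelled loops stay aligned
theorem pv_loop_eq (orig : List (Int × Int)) : ∀ (f : Nat) (ms : List (Int × Int)) (i : Int),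
    loopA orig f (simple_next_step ms) (i + 1)
      = loopB (orig.map Prod.fst, orig.map Prod.snd) f (ms.map Prod.fst, ms.map Prod.snd) i := by
  intro f
  induction f with
  | zero => intro ms i; simp [loopA, loopB]
  | succ f ih =>
      intro ms i
      simp only [loopA, loopB, pv_step_eq]
      by_cases h : simple_next_step ms = orig
      · rw [h, if_pos rfl, if_pos rfl]
      · rw [if_neg h, if_neg (fun hc => h (pv_unzip_inj _ _ (congrArg Prod.fst hc) (congrArg Prod.snd hc)))]
        exact ih (simple_next_step ms) (i + 1)

-- ===== VERDICT (by name: the statement is the Claim_ definition above) =====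
theorem iterate_til_repeat_spec : Claim_equal_iterate_til_repeat := by
  intro moons dimension _ _
  unfold Spec_iterate_til_repeat iterate_til_repeat iterate_til_repeat_alt
  have h := pv_loop_eq (moons.map (fun m => (PySem.List.pyGetD m.1 dimension 0, PySem.List.pyGetD m.2 dimension 0))) pvFuel (moons.map (fun m => (PySem.List.pyGetD m.1 dimension 0, PySem.List.pyGetD m.2 dimension 0))) 0
  simpa [List.map_map, Function.comp] using h
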